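-- pv_equiv track=rewrite | github.com/mrsambaga/LeetCode | String/022-Number_of_Segments_in _String.py | countSegments
-- ===== SOURCE A (Python) =====
-- def countSegments(s):
--     add = False
--     ans = 0
--     for x in s:
--         if x != " " and add == False:
--             ans += 1
--             add = True
--         elif x == " " :
--             add = False
--     return ans
-- ===== SOURCE B (Python) =====
-- def countSegments(s):
--     return len([w for w in s.split(" ") if w])
-- ===== Notes on version B (the rewrite author's own statement) =====
-- stated objective: idiomatic
-- what changed: Replaces the character-by-character boolean state machine with split on a single space followed by counting the non-empty pieces.
import Mathlib
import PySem

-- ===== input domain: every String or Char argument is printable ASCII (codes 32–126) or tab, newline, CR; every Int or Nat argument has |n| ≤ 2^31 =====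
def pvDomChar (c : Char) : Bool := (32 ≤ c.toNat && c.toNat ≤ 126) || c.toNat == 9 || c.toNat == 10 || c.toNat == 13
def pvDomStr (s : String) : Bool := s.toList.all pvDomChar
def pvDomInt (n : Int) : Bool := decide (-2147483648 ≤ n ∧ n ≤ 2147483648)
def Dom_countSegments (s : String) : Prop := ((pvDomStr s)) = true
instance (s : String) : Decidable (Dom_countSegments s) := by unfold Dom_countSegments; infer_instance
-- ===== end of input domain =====

-- B replaces A's per-character boolean state machine with split-on-" " and a count of the non-empty pieces (idiomatic; same cost).

-- ===== PORT A =====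
-- A: scan the characters with a flag `add`, incrementing at the start of each segment.
def countSegments (s : String) : Int :=
  (s.toList.foldl
    (fun st x =>
      if x ≠ ' ' ∧ st.1 = false then (true, st.2 + 1)
      else if x = ' ' then (false, st.2)
      else st)
    (false, (0 : Int))).2

-- ===== PORT B =====
-- B: s.split(" ") ported as List.splitOn ' ' on the char list (exact for a one-char separator), then count non-empty pieces.
def countSegments_alt (s : String) : Int :=
  (((s.toList.splitOn ' ').filter (fun w => w ≠ [])).length : Int)

-- ===== PRECONDITION & SPEC =====
def Spec_countSegments (s : String) (out : Int) : Prop := out = countSegments_alt s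
instance (s : String) (out : Int) : Decidable (Spec_countSegments s out) := by unfold Spec_countSegments; infer_instance

-- ===== CLAIM (what is proved, stated in full; the proofs are below) =====
def Claim_equal_countSegments : Prop := ∀ (s : String), Dom_countSegments s → Spec_countSegments s (countSegments s)

-- ===== LEMMAS AND PROOFS =====

-- number of segments in the remaining characters, given whether we are currently inside a segment
def segA : Bool → List Char → Int
  | _, [] => 0
  | add, (x :: xs) =>
    if x = ' ' then segA false xs
    else (if add then 0 else 1) + segA true xs

theorem foldA_eq (cs : List Char) : ∀ (add : Bool) (a : Int),
    (cs.foldl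
      (fun st x =>
        if x ≠ ' ' ∧ st.1 = false then (true, st.2 + 1)
        else if x = ' ' then (false, st.2)
        else st)
      (add, a)).2 = a + segA add cs := by
  induction cs with
  | nil => intro add a; simp [segA]
  | cons x xs ih =>
    intro add a
    by_cases hx : x = ' '
    · subst hx
      cases add <;> simp [segA, ih]
    · cases add <;> simp [segA, hx, ih] <;> ring
theorem segA_eq_split (cs : List Char) :
    segA true cs = (((cs.splitOnP (· == ' ')).tail.filter (fun w => w ≠ [])).length : Int) ∧
    segA false cs = (((cs.splitOnP (· == ' ')).filter (fun w => w ≠ [])).length : Int) := by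
  induction cs with
  | nil => simp [segA, List.splitOnP_nil]
  | cons x xs ih =>
    by_cases hx : x = ' '
    · subst hx
      simp [segA, List.splitOnP_cons, ih.2]
    · obtain ⟨h, t, hht⟩ : ∃ h t, xs.splitOnP (· == ' ') = h :: t := by
        cases hsp : xs.splitOnP (· == ' ') with
        | nil => exact absurd hsp (List.splitOnP_ne_nil _ _)
        | cons h t => exact ⟨h, t, rfl⟩
      have h1 := ih.1
      rw [hht] at h1
      simp only [List.tail_cons] at h1
      constructor
      · simp [segA, hx, List.splitOnP_cons, hht, h1]
      · simp [segA, hx, List.splitOnP_cons, hht, h1]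
        ring

-- ===== VERDICT (by name: the statement is the Claim_ definition above) =====
theorem countSegments_spec : Claim_equal_countSegments := by
  intro s _
  unfold Spec_countSegments countSegments countSegments_alt
  rw [foldA_eq, (segA_eq_split s.toList).2]
  · simp [List.splitOn]
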